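-- pv_equiv track=rewrite | github.com/damiangubbins/IIC2233-Backup | Tareas/T1/funciones.py | peones_invalidos
-- ===== SOURCE A (Python) =====
-- def peones_invalidos(tablero: list) -> int:
--     """
--     Cuenta la cantidad de peones invalidos (2+ peones adyacentes) en un (tablero: list)
--     """
--     n_filas, n_columnas = len(tablero), len(tablero[0])
--     invalidos = 0
--     peones = []
--
--     # Buscar y guardar coordenadas (i, j) de todos los peones
--     for fila in range(n_filas):
--         for columna in range(n_columnas):
--             if tablero[fila][columna] == "PP":
--                 peones.append((fila, columna))
--
--     # Contar cantidad de vecinos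
--     for peon in peones:
--         vecinos = 0
--
--         # Revisar todas las posiciones posibles para un vecino del peon
--         for coordenada in [(-1, 0), (1, 0), (0, -1), (0, 1)]:
--             posible_posicion = tuple(map(sum, zip(peon, coordenada)))
--
--             if posible_posicion in peones:
--                 vecinos += 1
--
--         if vecinos > 1:
--             invalidos += 1
--
--     return invalidos
-- ===== SOURCE B (Python) =====
-- def peones_invalidos(tablero: list) -> int:
--     """
--     Cuenta la cantidad de peones invalidos (2+ peones adyacentes) en un (tablero: list)
--     """
--     n_filas, n_columnas = len(tablero), len(tablero[0])
--     invalidos = 0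
--
--     for i in range(n_filas):
--         for j in range(n_columnas):
--             if tablero[i][j] == "PP":
--                 vecinos = 0
--                 for ni, nj in ((i - 1, j), (i + 1, j), (i, j - 1), (i, j + 1)):
--                     if 0 <= ni < n_filas and 0 <= nj < n_columnas and tablero[ni][nj] == "PP":
--                         vecinos += 1
--                 if vecinos > 1:
--                     invalidos += 1
--     return invalidos
-- ===== Notes on version B (the rewrite author's own statement) =====
-- stated objective: simpler
-- what changed: Instead of first materialising a coordinate list of all pawns and then testing each of the 4 neighbour coordinates by a linear membership scan of that list, B makes a single nested pass over the grid and checks the four neighbours directly on the board with bounds guards; no coordinate list is built.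
import Mathlib
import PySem

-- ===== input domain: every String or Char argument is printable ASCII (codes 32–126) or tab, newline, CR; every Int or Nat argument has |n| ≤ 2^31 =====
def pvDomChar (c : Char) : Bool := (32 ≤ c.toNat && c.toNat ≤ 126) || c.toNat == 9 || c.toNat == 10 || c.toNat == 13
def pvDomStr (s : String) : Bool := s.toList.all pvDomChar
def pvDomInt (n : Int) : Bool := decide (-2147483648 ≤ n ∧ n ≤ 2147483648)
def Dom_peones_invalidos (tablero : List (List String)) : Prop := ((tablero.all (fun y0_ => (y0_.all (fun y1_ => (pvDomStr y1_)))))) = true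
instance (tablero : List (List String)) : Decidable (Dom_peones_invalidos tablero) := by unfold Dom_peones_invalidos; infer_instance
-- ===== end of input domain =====

-- B replaces A's pawn-coordinate list and per-neighbour linear membership scans by one
-- direct nested pass over the grid with bounds-guarded neighbour lookups (simpler, no list).

-- tablero[i][j] (in-range on Pre_; out of range Python raises, excluded by Pre_)
def pvCell (tablero : List (List String)) (i j : Int) : String :=
  PySem.List.pyGetD (PySem.List.pyGetD tablero i []) j ""

-- ===== PORT A =====
def pvPeonesA (tablero : List (List String)) : List (Int × Int) :=
  (PySem.List.pyRange 0 tablero.length 1).foldl (fun acc fila =>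
    (PySem.List.pyRange 0 (PySem.List.pyGetD tablero 0 []).length 1).foldl (fun acc2 columna =>
      if pvCell tablero fila columna == "PP" then acc2 ++ [(fila, columna)] else acc2) acc) []

def peones_invalidos (tablero : List (List String)) : Int :=
  let peones := pvPeonesA tablero
  peones.foldl (fun invalidos peon =>
    let vecinos : Int :=
      [((-1 : Int), (0 : Int)), (1, 0), (0, -1), (0, 1)].foldl (fun v c =>
        if (peon.1 + c.1, peon.2 + c.2) ∈ peones then v + 1 else v) 0
    if vecinos > 1 then invalidos + 1 else invalidos) 0

-- ===== PORT B =====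
def peones_invalidos_alt (tablero : List (List String)) : Int :=
  let n_filas : Int := tablero.length
  let n_columnas : Int := (PySem.List.pyGetD tablero 0 []).length
  (PySem.List.pyRange 0 n_filas 1).foldl (fun inv i =>
    (PySem.List.pyRange 0 n_columnas 1).foldl (fun inv2 j =>
      if pvCell tablero i j == "PP" then
        let vecinos : Int :=
          [(i - 1, j), (i + 1, j), (i, j - 1), (i, j + 1)].foldl (fun v q =>
            if 0 ≤ q.1 ∧ q.1 < n_filas ∧ 0 ≤ q.2 ∧ q.2 < n_columnas ∧
                pvCell tablero q.1 q.2 == "PP" then v + 1 else v) 0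
        if vecinos > 1 then inv2 + 1 else inv2
      else inv2) inv) 0

-- ===== PRECONDITION & SPEC =====
-- Pre_ excludes exactly the inputs where Python A raises IndexError: the empty board
-- (tablero[0]) and boards with a row shorter than row 0 (tablero[fila][columna]).
def Pre_peones_invalidos (tablero : List (List String)) : Prop :=
  tablero ≠ [] ∧ ∀ row ∈ tablero, (tablero.headD []).length ≤ row.length
instance (tablero : List (List String)) : Decidable (Pre_peones_invalidos tablero) := by
  unfold Pre_peones_invalidos; infer_instance
def pvWitness_peones_invalidos : List (List String) := [["PP", "--"], ["PP", "PP"]]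

def Spec_peones_invalidos (tablero : List (List String)) (out : Int) : Prop := out = peones_invalidos_alt tablero
instance (tablero : List (List String)) (out : Int) : Decidable (Spec_peones_invalidos tablero out) := by unfold Spec_peones_invalidos; infer_instance

-- ===== CLAIM (what is proved, stated in full; the proofs are below) =====
def Claim_equal_peones_invalidos : Prop := ∀ (tablero : List (List String)), Dom_peones_invalidos tablero → Pre_peones_invalidos tablero → Spec_peones_invalidos tablero (peones_invalidos tablero)

-- ===== LEMMAS AND PROOFS =====

-- closed-form "is a pawn cell" predicate
def pvIsPawn (t : List (List String)) (p : Int × Int) : Bool :=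
  decide (0 ≤ p.1) && decide (p.1 < (t.length : Int)) && decide (0 ≤ p.2) &&
  decide (p.2 < ((PySem.List.pyGetD t 0 []).length : Int)) && (pvCell t p.1 p.2 == "PP")

def pvVec (t : List (List String)) (i j : Int) : Int :=
  [(i - 1, j), (i + 1, j), (i, j - 1), (i, j + 1)].foldl
    (fun v q => if pvIsPawn t q then v + 1 else v) 0

def pvBad (t : List (List String)) (i j : Int) : Bool := decide (pvVec t i j > 1)

theorem pvPeonesA_eq (t : List (List String)) :
    pvPeonesA t = (PySem.List.pyRange 0 t.length 1).flatMap (fun i =>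
      ((PySem.List.pyRange 0 (PySem.List.pyGetD t 0 []).length 1).filter
        (fun j => pvCell t i j == "PP")).map (fun j => (i, j))) := by
  unfold pvPeonesA
  simp only [PySem.List.foldl_append_if, PySem.List.foldl_append_eq_flatMap, List.nil_append]

theorem mem_pvPeonesA (t : List (List String)) (p : Int × Int) :
    p ∈ pvPeonesA t ↔ pvIsPawn t p = true := by
  rw [pvPeonesA_eq]
  simp only [List.mem_flatMap, List.mem_map, List.mem_filter, PySem.List.mem_pyRange_one,
    pvIsPawn, Bool.and_eq_true, decide_eq_true_eq]
  constructor
  · rintro ⟨i, ⟨hi0, hi1⟩, j, ⟨⟨hj0, hj1⟩, hc⟩, rfl⟩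
    exact ⟨⟨⟨⟨hi0, hi1⟩, hj0⟩, hj1⟩, hc⟩
  · rintro ⟨⟨⟨⟨hi0, hi1⟩, hj0⟩, hj1⟩, hc⟩
    exact ⟨p.1, ⟨hi0, hi1⟩, p.2, ⟨⟨hj0, hj1⟩, hc⟩, rfl⟩

theorem if_mem_pvPeonesA (t : List (List String)) (q : Int × Int) (x y : Int) :
    (if q ∈ pvPeonesA t then x else y) = (if pvIsPawn t q then x else y) := by
  by_cases h : q ∈ pvPeonesA t
  · rw [if_pos h, if_pos ((mem_pvPeonesA t q).mp h)]
  · rw [if_neg h, if_neg (fun hb => h ((mem_pvPeonesA t q).mpr hb))]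

-- A's inner neighbour loop computes pvVec
theorem vecA_eq (t : List (List String)) (p : Int × Int) :
    ([((-1 : Int), (0 : Int)), (1, 0), (0, -1), (0, 1)].foldl (fun v c =>
        if (p.1 + c.1, p.2 + c.2) ∈ pvPeonesA t then v + 1 else v) (0 : Int))
      = pvVec t p.1 p.2 := by
  simp only [List.foldl, if_mem_pvPeonesA, pvVec]
  simp only [← sub_eq_add_neg, add_zero]

-- cast of a summed Nat-valued map
theorem sum_map_cast (l : List Int) (f : Int → ℕ) :
    (l.map (fun x => ((f x : ℕ) : Int))).sum = ((l.map f).sum : ℕ) := by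
  induction l with
  | nil => rfl
  | cons a l ih => simp [ih]

theorem countP_flatMap' {α β : Type} (l : List α) (g : α → List β) (p : β → Bool) :
    (l.flatMap g).countP p = (l.map (fun x => (g x).countP p)).sum := by
  induction l with
  | nil => rfl
  | cons a l ih => simp [List.flatMap_cons, List.countP_append, ih]

-- A reduces to the closed form
theorem A_eq (t : List (List String)) :
    peones_invalidos t =
      ((PySem.List.pyRange 0 t.length 1).map (fun i =>
        (((PySem.List.pyRange 0 (PySem.List.pyGetD t 0 []).length 1).countP
          (fun j => pvBad t i j && (pvCell t i j == "PP"))) : Int))).sum := by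
  have h0 : peones_invalidos t = (pvPeonesA t).foldl (fun invalidos peon =>
      if ([((-1 : Int), (0 : Int)), (1, 0), (0, -1), (0, 1)].foldl (fun v c =>
        if (peon.1 + c.1, peon.2 + c.2) ∈ pvPeonesA t then v + 1 else v) (0 : Int)) > 1
      then invalidos + 1 else invalidos) (0 : Int) := rfl
  have h1 : (pvPeonesA t).foldl (fun invalidos peon =>
      if ([((-1 : Int), (0 : Int)), (1, 0), (0, -1), (0, 1)].foldl (fun v c =>
        if (peon.1 + c.1, peon.2 + c.2) ∈ pvPeonesA t then v + 1 else v) (0 : Int)) > 1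
      then invalidos + 1 else invalidos) (0 : Int)
      = (pvPeonesA t).foldl (fun invalidos peon =>
          if pvBad t peon.1 peon.2 then invalidos + 1 else invalidos) (0 : Int) := by
    apply PySem.List.foldl_congr_mem
    intro acc p _
    rw [vecA_eq]
    by_cases hb : 1 < pvVec t p.1 p.2 <;> simp [pvBad, hb]
  rw [h0]
  refine h1.trans ?_
  rw [PySem.List.foldl_if_add_one, pvPeonesA_eq, countP_flatMap']
  simp only [List.countP_map, List.countP_filter, Function.comp_def]
  rw [← sum_map_cast]
  simp

-- B reduces to the same closed form
def pvRowFoldB (t : List (List String)) (i inv : Int) : Int :=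
  (PySem.List.pyRange 0 ((PySem.List.pyGetD t 0 []).length : Int) 1).foldl (fun inv2 j =>
    if pvCell t i j == "PP" then
      (if ([(i - 1, j), (i + 1, j), (i, j - 1), (i, j + 1)].foldl (fun v q =>
          if 0 ≤ q.1 ∧ q.1 < (t.length : Int) ∧ 0 ≤ q.2 ∧
              q.2 < ((PySem.List.pyGetD t 0 []).length : Int) ∧
              pvCell t q.1 q.2 == "PP" then v + 1 else v) (0 : Int)) > 1
        then inv2 + 1 else inv2)
    else inv2) inv

theorem vecB_eq (t : List (List String)) (i j : Int) :
    ([(i - 1, j), (i + 1, j), (i, j - 1), (i, j + 1)].foldl (fun v q =>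
        if 0 ≤ q.1 ∧ q.1 < (t.length : Int) ∧ 0 ≤ q.2 ∧
            q.2 < ((PySem.List.pyGetD t 0 []).length : Int) ∧
            pvCell t q.1 q.2 == "PP" then v + 1 else v) (0 : Int)) = pvVec t i j := by
  unfold pvVec
  apply PySem.List.foldl_congr_mem
  intro acc q _
  have h : (0 ≤ q.1 ∧ q.1 < (t.length : Int) ∧ 0 ≤ q.2 ∧
      q.2 < ((PySem.List.pyGetD t 0 []).length : Int) ∧ pvCell t q.1 q.2 == "PP")
      ↔ pvIsPawn t q = true := by
    simp [pvIsPawn, and_assoc]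
  rw [if_congr h rfl rfl]

theorem rowB_eq (t : List (List String)) (i inv : Int) :
    pvRowFoldB t i inv = inv +
      (((PySem.List.pyRange 0 (PySem.List.pyGetD t 0 []).length 1).countP
        (fun j => pvBad t i j && (pvCell t i j == "PP"))) : Int) := by
  unfold pvRowFoldB
  have hbody : (PySem.List.pyRange 0 ((PySem.List.pyGetD t 0 []).length : Int) 1).foldl (fun inv2 j =>
      if pvCell t i j == "PP" then
        (if ([(i - 1, j), (i + 1, j), (i, j - 1), (i, j + 1)].foldl (fun v q =>
            if 0 ≤ q.1 ∧ q.1 < (t.length : Int) ∧ 0 ≤ q.2 ∧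
                q.2 < ((PySem.List.pyGetD t 0 []).length : Int) ∧
                pvCell t q.1 q.2 == "PP" then v + 1 else v) (0 : Int)) > 1
          then inv2 + 1 else inv2)
      else inv2) inv
      = (PySem.List.pyRange 0 ((PySem.List.pyGetD t 0 []).length : Int) 1).foldl (fun inv2 j =>
          if pvBad t i j && (pvCell t i j == "PP") then inv2 + 1 else inv2) inv := by
    apply PySem.List.foldl_congr_mem
    intro acc j _
    rw [vecB_eq]
    by_cases hc : pvCell t i j == "PP" <;> by_cases hb : 1 < pvVec t i j <;>
      simp [pvBad, hc, hb]
  rw [hbody, PySem.List.foldl_if_add_one]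

theorem B_eq (t : List (List String)) :
    peones_invalidos_alt t =
      ((PySem.List.pyRange 0 t.length 1).map (fun i =>
        (((PySem.List.pyRange 0 (PySem.List.pyGetD t 0 []).length 1).countP
          (fun j => pvBad t i j && (pvCell t i j == "PP"))) : Int))).sum := by
  have h0 : peones_invalidos_alt t =
      (PySem.List.pyRange 0 (t.length : Int) 1).foldl (fun inv i => pvRowFoldB t i inv) 0 := rfl
  have h1 : (PySem.List.pyRange 0 (t.length : Int) 1).foldl (fun inv i => pvRowFoldB t i inv) 0
      = (PySem.List.pyRange 0 (t.length : Int) 1).foldl (fun inv i => inv +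
          (((PySem.List.pyRange 0 (PySem.List.pyGetD t 0 []).length 1).countP
            (fun j => pvBad t i j && (pvCell t i j == "PP"))) : Int)) 0 := by
    apply PySem.List.foldl_congr_mem
    intro acc i _
    exact rowB_eq t i acc
  rw [h0]
  refine h1.trans ?_
  rw [PySem.List.foldl_add]
  simp

-- ===== VERDICT (by name: the statement is the Claim_ definition above) =====
theorem peones_invalidos_spec : Claim_equal_peones_invalidos := by
  intro t _ _
  unfold Spec_peones_invalidos
  rw [A_eq, B_eq]
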